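-- pv_equiv track=rewrite | github.com/Edgar-O/Data-Analysis-Projects | neural_layer_builder.py | layer_combo
-- ===== SOURCE A (Python) =====
-- def layer_combo(num_layers, neurons_per_layer):
--     import itertools
--     df = []
--     layers = []
--     iter_layer = 0
--     while iter_layer < num_layers:
--         layers.append([i for i in range(1, neurons_per_layer[iter_layer]+1)])
--         iter_layer += 1
--
--     for j in itertools.product(*layers):
--         df.append(list(j))
--
--     return df
-- ===== SOURCE B (Python) =====
-- def layer_combo(num_layers, neurons_per_layer):
--     # Mixed-radix decoding: the k-th combination (lexicographic, last layer
--     # fastest) is the base-(sizes) representation of k, each digit shifted by 1.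
--     sizes = [max(neurons_per_layer[i], 0) for i in range(num_layers)]
--     total = 1
--     for s in sizes:
--         total *= s
--     out = []
--     for k in range(total):
--         combo = []
--         rem = k
--         for s in reversed(sizes):
--             combo.append(rem % s + 1)
--             rem //= s
--         combo.reverse()
--         out.append(combo)
--     return out
-- ===== Notes on version B (the rewrite author's own statement) =====
-- stated objective: alternative
-- what changed: Instead of materialising per-layer range lists and taking itertools.product, B computes the k-th combination arithmetically for k in range(prod sizes) by mixed-radix decoding (repeated divmod over reversed sizes, digits shifted by 1).
import Mathlib
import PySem

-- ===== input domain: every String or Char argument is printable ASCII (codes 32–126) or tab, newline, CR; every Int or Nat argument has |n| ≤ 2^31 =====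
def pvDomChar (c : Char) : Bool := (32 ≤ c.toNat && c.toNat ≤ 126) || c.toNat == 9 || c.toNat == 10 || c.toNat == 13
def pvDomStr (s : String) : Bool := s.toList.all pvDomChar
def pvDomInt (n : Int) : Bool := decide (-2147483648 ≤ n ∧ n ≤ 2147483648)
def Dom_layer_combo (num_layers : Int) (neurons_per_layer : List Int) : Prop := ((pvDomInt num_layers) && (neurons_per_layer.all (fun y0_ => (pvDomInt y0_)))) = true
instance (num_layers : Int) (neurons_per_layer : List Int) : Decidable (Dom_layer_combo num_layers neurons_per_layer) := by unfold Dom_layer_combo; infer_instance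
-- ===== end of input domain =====

-- B replaces the while-loop + itertools.product of A by mixed-radix index decoding: the k-th
-- combination is computed arithmetically (divmod digits of k, shifted by 1); no product structure is built.

-- ===== PORT A =====
-- the while loop building `layers`, fueled by the exact iteration count num_layers.toNat;
-- pyGet? none = IndexError (excluded by Pre_)
def buildLayersA (npl : List Int) : Nat → Int → List (List Int) → List (List Int)
  | 0, _, acc => acc
  | k + 1, iter, acc =>
    match PySem.List.pyGet? npl iter with
    | some n => buildLayersA npl k (iter + 1) (acc ++ [PySem.List.pyRange 1 (n + 1) 1])
    | none => acc

-- itertools.product(*layers), lexicographic (last component varies fastest)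
def iterProduct : List (List Int) → List (List Int)
  | [] => [[]]
  | l :: ls => l.flatMap (fun x => (iterProduct ls).map (fun t => x :: t))

def layer_combo (num_layers : Int) (neurons_per_layer : List Int) : List (List Int) :=
  let layers := buildLayersA neurons_per_layer num_layers.toNat 0 []
  (iterProduct layers).foldl (fun df j => df ++ [j]) []

-- ===== PORT B =====
-- one step of Source B's inner digit loop: state = (combo so far, rem)
def stepD (st : List Int × Int) (s : Int) : List Int × Int :=
  (st.1 ++ [PySem.Int.mod st.2 s + 1], PySem.Int.floordiv st.2 s)

-- the body of Source B's `for k in range(total)` loop: digits of k over reversed(sizes), then reversed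
def decode (sizes : List Int) (k : Int) : List Int :=
  (sizes.reverse.foldl stepD ([], k)).1.reverse

def layer_combo_alt (num_layers : Int) (neurons_per_layer : List Int) : List (List Int) :=
  let sizes := (PySem.List.pyRange 0 num_layers 1).map
    (fun i => max (PySem.List.pyGetD neurons_per_layer i 0) 0)
  let total := sizes.foldl (fun t s => t * s) 1
  (PySem.List.pyRange 0 total 1).foldl (fun out k => out ++ [decode sizes k]) []

-- ===== PRECONDITION & SPEC =====
-- Pre_ excludes exactly the inputs where A raises IndexError (num_layers exceeds the list length)
def Pre_layer_combo (num_layers : Int) (neurons_per_layer : List Int) : Prop :=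
  num_layers ≤ (neurons_per_layer.length : Int)
instance (num_layers : Int) (neurons_per_layer : List Int) : Decidable (Pre_layer_combo num_layers neurons_per_layer) := by unfold Pre_layer_combo; infer_instance

def pvWitness_layer_combo : Int × List Int := (2, [2, 3])

def Spec_layer_combo (num_layers : Int) (neurons_per_layer : List Int) (out : List (List Int)) : Prop := out = layer_combo_alt num_layers neurons_per_layer
instance (num_layers : Int) (neurons_per_layer : List Int) (out : List (List Int)) : Decidable (Spec_layer_combo num_layers neurons_per_layer out) := by unfold Spec_layer_combo; infer_instance

-- ===== CLAIM (what is proved, stated in full; the proofs are below) =====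
def Claim_equal_layer_combo : Prop := ∀ (num_layers : Int) (neurons_per_layer : List Int), Dom_layer_combo num_layers neurons_per_layer → Pre_layer_combo num_layers neurons_per_layer → Spec_layer_combo num_layers neurons_per_layer (layer_combo num_layers neurons_per_layer)

-- ===== LEMMAS AND PROOFS =====

def rng (n : Int) : List Int := PySem.List.pyRange 1 (n + 1) 1

def layerAt (npl : List Int) (i : Int) : List Int :=
  PySem.List.pyRange 1 (PySem.List.pyGetD npl i 0 + 1) 1

-- ---- A side (characterisation of the while loop and the append fold) ----

lemma buildLayersA_eq (npl : List Int) :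
    ∀ (k : Nat) (iter : Int) (acc : List (List Int)), 0 ≤ iter →
      iter + k ≤ (npl.length : Int) →
      buildLayersA npl k iter acc
        = acc ++ (List.range k).map (fun j : Nat => layerAt npl (iter + (j : Int)))
  | 0, iter, acc, _, _ => by simp [buildLayersA]
  | k + 1, iter, acc, h0, hk => by
    have hlt : iter < ↑npl.length := by push_cast at hk; omega
    have hin : PySem.List.pyGet? npl iter = some (PySem.List.pyGetD npl iter 0) := by
      rw [PySem.List.pyGetD_eq_getElem npl 0 h0 hlt]
      simp only [PySem.List.pyGet?, PySem.List.pyIdx?, h0, ↓reduceIte, hlt, Option.bind_some,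
        Int.toNat_lt, getElem?_pos]
    rw [buildLayersA, hin]
    dsimp only
    rw [buildLayersA_eq npl k (iter + 1) _ (by omega) (by push_cast at hk ⊢; omega)]
    rw [List.range_succ_eq_map]
    simp only [List.map_cons, Int.natCast_zero, Int.add_zero, List.map_map, List.append_assoc,
      List.cons_append, List.nil_append, layerAt]
    apply congrArg
    apply congrArg
    apply List.map_congr_left
    intro j _
    simp only [Function.comp]
    have he : iter + 1 + (j:Int) = iter + ((j.succ : Nat) : Int) := by push_cast; ring
    rw [he]

lemma foldl_id (l : List (List Int)) : ∀ acc, l.foldl (fun df j => df ++ [j]) acc = acc ++ l := by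
  induction l with
  | nil => intro acc; simp
  | cons x t ih => intro acc; simp [List.foldl_cons, ih]

-- ---- B side: characterisation of the digit fold ----

lemma foldl_stepD_acc : ∀ (M : List Int) (c0 : List Int) (k : Int),
    M.foldl stepD (c0, k) = (c0 ++ (M.foldl stepD ([], k)).1, (M.foldl stepD ([], k)).2) := by
  intro M
  induction M with
  | nil => intro c0 k; simp
  | cons s t ih =>
    intro c0 k
    simp only [List.foldl_cons, stepD, List.nil_append]
    rw [ih (c0 ++ [PySem.Int.mod k s + 1]), ih [PySem.Int.mod k s + 1]]
    simp

lemma foldD_main : ∀ (M : List Int), (∀ s ∈ M, 1 ≤ s) → ∀ x r : Int, 0 ≤ x → 0 ≤ r → r < M.prod →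
    M.foldl stepD ([], x * M.prod + r) = ((M.foldl stepD ([], r)).1, x) := by
  intro M
  induction M with
  | nil =>
    intro _ x r _ hr hrP
    simp only [List.prod_nil] at hrP
    have : r = 0 := by omega
    simp [this]
  | cons s t ih =>
    intro h x r hx hr hrP
    have hs : (1:Int) ≤ s := h s List.mem_cons_self
    have ht : ∀ u ∈ t, (1:Int) ≤ u := fun u hu => h u (List.mem_cons_of_mem _ hu)
    have hP : 0 < t.prod := List.prod_pos (fun u hu => lt_of_lt_of_le zero_lt_one (ht u hu))
    simp only [List.prod_cons] at hrP
    have hmod : PySem.Int.mod (x * (s * t.prod) + r) s = PySem.Int.mod r s := by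
      rw [PySem.Int.mod_eq_emod_of_pos (by omega), PySem.Int.mod_eq_emod_of_pos (by omega)]
      have he : x * (s * t.prod) + r = r + x * t.prod * s := by ring
      rw [he, Int.add_mul_emod_self_right]
    have hdiv : PySem.Int.floordiv (x * (s * t.prod) + r) s
        = x * t.prod + PySem.Int.floordiv r s := by
      rw [PySem.Int.floordiv_eq_ediv_of_pos (by omega), PySem.Int.floordiv_eq_ediv_of_pos (by omega)]
      have he : x * (s * t.prod) + r = r + x * t.prod * s := by ring
      rw [he, Int.add_mul_ediv_right _ _ (by omega : s ≠ 0)]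
      ring
    have hrdiv0 : 0 ≤ PySem.Int.floordiv r s := by
      rw [PySem.Int.floordiv_eq_ediv_of_pos (by omega)]; exact Int.ediv_nonneg hr (by omega)
    have hrdivP : PySem.Int.floordiv r s < t.prod := by
      rw [PySem.Int.floordiv_eq_ediv_of_pos (by omega)]
      rw [Int.ediv_lt_iff_lt_mul (by omega)]
      calc r < s * t.prod := hrP
        _ = t.prod * s := by ring
    simp only [List.foldl_cons, stepD, List.nil_append, List.prod_cons]
    rw [hmod, hdiv, foldl_stepD_acc t [PySem.Int.mod r s + 1],
      ih ht x (PySem.Int.floordiv r s) hx hrdiv0 hrdivP,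
      foldl_stepD_acc t [PySem.Int.mod r s + 1]]

-- the k-th digit block: decoding x * prod t + r peels off digit x+1
lemma decode_cons (s : Int) (t : List Int) (x r : Int) (hs : 1 ≤ s) (ht : ∀ u ∈ t, (1:Int) ≤ u)
    (hx0 : 0 ≤ x) (hxs : x < s) (hr0 : 0 ≤ r) (hrP : r < t.prod) :
    decode (s :: t) (x * t.prod + r) = (x + 1) :: decode t r := by
  unfold decode
  rw [List.reverse_cons, List.foldl_append]
  have hrev1 : ∀ u ∈ t.reverse, (1:Int) ≤ u := fun u hu => ht u (List.mem_reverse.mp hu)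
  have hrevP : t.reverse.prod = t.prod := by simp
  rw [show x * t.prod + r = x * t.reverse.prod + r by rw [hrevP]]
  rw [foldD_main t.reverse hrev1 x r hx0 hr0 (by rw [hrevP]; exact hrP)]
  have hxmod : PySem.Int.mod x s = x := by
    rw [PySem.Int.mod_eq_emod_of_pos (by omega)]
    exact Int.emod_eq_of_lt hx0 hxs
  simp [stepD, hxmod]

lemma range_mul_flat (a b : Nat) : List.range (a * b)
    = (List.range a).flatMap (fun x => (List.range b).map (fun r => x * b + r)) := by
  induction a with
  | zero => simp
  | succ a ih =>
    rw [Nat.succ_mul, List.range_add, ih, List.range_succ, List.flatMap_append]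
    simp [Nat.add_comm]

-- central lemma: the lexicographic product of the per-layer ranges
-- is the mixed-radix decoding of the indices 0 .. prod-1
lemma mainB : ∀ (ss : List Int), (∀ s ∈ ss, 0 ≤ s) →
    iterProduct (ss.map rng)
      = (List.range ss.prod.toNat).map (fun k : Nat => decode ss (k : Int)) := by
  intro ss
  induction ss with
  | nil => simp [iterProduct, decode, List.range_succ]
  | cons s t ih =>
    intro h
    have hs : (0:Int) ≤ s := h s List.mem_cons_self
    have ht : ∀ u ∈ t, (0:Int) ≤ u := fun u hu => h u (List.mem_cons_of_mem _ hu)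
    have hP : 0 ≤ t.prod := List.prod_nonneg ht
    simp only [List.map_cons, iterProduct, ih ht, List.prod_cons]
    by_cases hs0 : s = 0
    · subst hs0; simp [rng, PySem.List.pyRange]
    · by_cases hP0 : t.prod = 0
      · simp [hP0]
      · have hs1 : (1:Int) ≤ s := by omega
        have hP1 : (0:Int) < t.prod := by omega
        have ht1 : ∀ u ∈ t, (1:Int) ≤ u := by
          intro u hu
          rcases lt_or_eq_of_le (ht u hu) with h1 | h1
          · omega
          · exact absurd (List.prod_eq_zero (h1 ▸ hu)) hP0
        have htot : (s * t.prod).toNat = s.toNat * t.prod.toNat := Int.toNat_mul hs hP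
        have hrng : rng s = (List.range s.toNat).map (fun x : Nat => 1 + (x : Int)) := by
          rw [rng, PySem.List.pyRange_one]
          have : (s + 1 - 1).toNat = s.toNat := by omega
          rw [this]
        rw [htot, range_mul_flat, hrng]
        simp only [List.flatMap_map, List.map_flatMap, List.map_map]
        apply List.flatMap_congr
        intro x hx
        rw [List.mem_range] at hx
        apply List.map_congr_left
        intro r hr
        rw [List.mem_range] at hr
        simp only [Function.comp]
        have hxI : (0:Int) ≤ (x:Int) ∧ ((x:Int)) < s := by
          constructor
          · exact Int.natCast_nonneg x
          · omega
        have hrI : (0:Int) ≤ (r:Int) ∧ ((r:Int)) < t.prod := by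
          constructor
          · exact Int.natCast_nonneg r
          · omega
        have hcast : ((x * t.prod.toNat + r : Nat) : Int) = (x:Int) * t.prod + (r:Int) := by
          push_cast [Int.toNat_of_nonneg hP]
          ring
        rw [hcast, decode_cons s t (x:Int) (r:Int) hs1 ht1 hxI.1 hxI.2 hrI.1 hrI.2]
        rw [add_comm (1:Int) (x:Int)]

-- aligning A's per-index ranges with B's clamped sizes
lemma rng_max (n : Int) : rng (max n 0) = PySem.List.pyRange 1 (n + 1) 1 := by
  rw [rng, PySem.List.pyRange_one, PySem.List.pyRange_one]
  have : (max n 0 + 1 - 1).toNat = (n + 1 - 1).toNat := by omega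
  rw [this]

theorem layer_combo_spec_aux (num_layers : Int) (neurons_per_layer : List Int)
    (hpre : Pre_layer_combo num_layers neurons_per_layer) :
    layer_combo num_layers neurons_per_layer = layer_combo_alt num_layers neurons_per_layer := by
  have hlen : (num_layers.toNat : Int) ≤ (neurons_per_layer.length : Int) := by
    unfold Pre_layer_combo at hpre; omega
  set sizes := (PySem.List.pyRange 0 num_layers 1).map
    (fun i => max (PySem.List.pyGetD neurons_per_layer i 0) 0) with hsizes
  have hnn : ∀ s ∈ sizes, (0:Int) ≤ s := by
    intro s hs
    rw [hsizes] at hs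
    rcases List.mem_map.mp hs with ⟨i, _, hi⟩
    omega
  -- A side
  rw [layer_combo]
  rw [buildLayersA_eq neurons_per_layer num_layers.toNat 0 [] le_rfl (by omega)]
  rw [foldl_id, List.nil_append, List.nil_append]
  have hlayers : (List.range num_layers.toNat).map (fun j : Nat => layerAt neurons_per_layer (0 + (j : Int)))
      = sizes.map rng := by
    rw [hsizes, PySem.List.pyRange_one]
    simp only [Int.sub_zero, List.map_map]
    apply List.map_congr_left
    intro j _
    simp only [Function.comp, Int.zero_add, layerAt]
    rw [rng_max]
  rw [hlayers, mainB sizes hnn]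
  -- B side
  rw [layer_combo_alt]
  simp only [← hsizes]
  have htotal : sizes.foldl (fun t s => t * s) 1 = sizes.prod := List.prod_eq_foldl.symm
  rw [htotal, PySem.List.pyRange_one, PySem.List.foldl_append_singleton_eq_map]
  simp only [Int.sub_zero, List.map_map, List.nil_append]
  apply List.map_congr_left
  intro k _
  simp [Function.comp]

-- ===== VERDICT (by name: the statement is the Claim_ definition above) =====
theorem layer_combo_spec : Claim_equal_layer_combo := by
  intro nl npl _ hpre
  unfold Spec_layer_combo
  exact layer_combo_spec_aux nl npl hpre
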